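-- pv_equiv track=rewrite | github.com/engineerjkk/CodingTest | 프로그래머스/1/133502. 햄버거 만들기/햄버거 만들기.py | solution
-- ===== SOURCE A (Python) =====
-- def solution(ingredient):
--
--     s=[]
--     answer=0
--     for i in ingredient:
--         s.append(i)
--         if len(s)>=4 and s[-4:]==[1,2,3,1]:
--             answer+=1
--             for _ in range(4):
--                 s.pop()
--     return answer
-- ===== SOURCE B (Python) =====
-- def solution(ingredient):
--     lst = list(ingredient)
--     answer = 0
--     while True:
--         for i in range(len(lst) - 3):
--             if lst[i:i + 4] == [1, 2, 3, 1]: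
--                 del lst[i:i + 4]
--                 answer += 1
--                 break
--         else:
--             return answer
-- ===== Notes on version B (the rewrite author's own statement) =====
-- stated objective: alternative
-- what changed: Replaces the single-pass stack machine with an in-place rewriting reduction: repeatedly scan a working copy for the first contiguous occurrence of [1,2,3,1], delete it and count, until no occurrence remains.
import Mathlib
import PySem

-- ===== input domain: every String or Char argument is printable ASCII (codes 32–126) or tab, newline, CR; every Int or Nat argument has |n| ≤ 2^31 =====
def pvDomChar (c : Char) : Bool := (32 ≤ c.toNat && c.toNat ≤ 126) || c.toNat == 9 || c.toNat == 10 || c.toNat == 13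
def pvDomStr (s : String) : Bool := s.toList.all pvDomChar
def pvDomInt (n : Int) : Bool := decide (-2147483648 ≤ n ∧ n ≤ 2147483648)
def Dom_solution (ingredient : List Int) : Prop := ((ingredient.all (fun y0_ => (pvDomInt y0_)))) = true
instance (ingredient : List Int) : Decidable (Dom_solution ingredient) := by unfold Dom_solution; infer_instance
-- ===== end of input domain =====

-- B replaces A's single-pass stack with repeated find-first-occurrence-and-delete reduction
-- on a working copy ('alternative' objective; same return value; neither mutates the argument).

-- ===== PORT A =====
-- one loop step of A: push i, and if the stack's last 4 elements are [1,2,3,1], count and pop 4 times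
def solStep (p : List Int × Int) (i : Int) : List Int × Int :=
  let s := p.1 ++ [i]
  if 4 ≤ s.length ∧ PySem.List.slice s (some (-4)) none = [1, 2, 3, 1] then
    (s.dropLast.dropLast.dropLast.dropLast, p.2 + 1)
  else (s, p.2)

def solution (ingredient : List Int) : Int :=
  (ingredient.foldl solStep ([], 0)).2

-- ===== PORT B =====
-- the inner for-loop of B: first index where lst[i:i+4] == [1,2,3,1], returned as the
-- (prefix, suffix) pair that 'del lst[i:i+4]' leaves; none = the for-loop fell through
def findBurger : List Int → Option (List Int × List Int)
  | a :: b :: c :: d :: t =>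
      if [a, b, c, d] = [1, 2, 3, 1] then some ([], t)
      else
        match findBurger (b :: c :: d :: t) with
        | some (u, v) => some (a :: u, v)
        | none => none
  | _ => none

-- needed by solution_alt's termination proof
theorem findBurger_split {l u v : List Int} (h : findBurger l = some (u, v)) :
    l = u ++ [1, 2, 3, 1] ++ v := by
  induction l generalizing u v with
  | nil => simp [findBurger] at h
  | cons a t ih =>
    match t, h with
    | b :: c :: d :: t', h =>
      rw [findBurger] at h
      split at h
      · next heq =>
        obtain ⟨rfl, rfl⟩ := by simpa using h
        simp_all
      · next hne =>
        cases hfb : findBurger (b :: c :: d :: t') with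
        | none => rw [hfb] at h; simp at h
        | some p =>
          obtain ⟨u', v'⟩ := p
          rw [hfb] at h
          obtain ⟨rfl, rfl⟩ := by simpa using h
          have := ih hfb
          simp [this]

-- B's while-loop: delete the first occurrence and repeat until none is found
def solGo (l : List Int) : Int :=
  match h : findBurger l with
  | none => 0
  | some (u, v) => 1 + solGo (u ++ v)
termination_by l.length
decreasing_by
  have := findBurger_split h
  subst this
  simp
  omega

def solution_alt (ingredient : List Int) : Int := solGo ingredient

-- ===== PRECONDITION & SPEC =====
def Spec_solution (ingredient : List Int) (out : Int) : Prop := out = solution_alt ingredient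
instance (ingredient : List Int) (out : Int) : Decidable (Spec_solution ingredient out) := by unfold Spec_solution; infer_instance

-- ===== CLAIM (what is proved, stated in full; the proofs are below) =====
def Claim_equal_solution : Prop := ∀ (ingredient : List Int), Dom_solution ingredient → Spec_solution ingredient (solution ingredient)

-- ===== LEMMAS AND PROOFS =====

-- 'u contains no contiguous occurrence of [1,2,3,1]'
def NoOcc (u : List Int) : Prop := ¬ ∃ x y, u = x ++ [1, 2, 3, 1] ++ y

theorem solStep_ends (p : List Int × Int) (i : Int)
    (h : ∃ t, p.1 ++ [i] = t ++ [1, 2, 3, 1]) :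
    solStep p i = ((p.1 ++ [i]).dropLast.dropLast.dropLast.dropLast, p.2 + 1) := by
  obtain ⟨t, ht⟩ := h
  unfold solStep
  rw [if_pos]
  constructor
  · rw [ht]; simp
  · rw [ht, PySem.List.slice_from_neg_ofNat _ 4 (by omega)]
    simp

theorem solStep_not_ends (p : List Int × Int) (i : Int)
    (h : ¬ ∃ t, p.1 ++ [i] = t ++ [1, 2, 3, 1]) :
    solStep p i = (p.1 ++ [i], p.2) := by
  unfold solStep
  rw [if_neg]
  rintro ⟨hlen, hsl⟩
  rw [PySem.List.slice_from_neg_ofNat _ 4 (by omega)] at hsl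
  exact h ⟨(p.1 ++ [i]).take ((p.1 ++ [i]).length - 4), by rw [← hsl, List.take_append_drop]⟩

-- processing an occurrence-free prefix from the empty stack just copies it onto the stack
theorem foldl_noOcc (u : List Int) (hu : NoOcc u) :
    u.foldl solStep ([], 0) = (u, 0) := by
  induction u using List.reverseRecOn with
  | nil => rfl
  | append_singleton w i ih =>
    have hw : NoOcc w := by
      rintro ⟨x, y, rfl⟩
      exact hu ⟨x, y ++ [i], by simp⟩
    rw [List.foldl_append, ih hw, List.foldl_cons, List.foldl_nil]
    apply solStep_not_ends
    rintro ⟨t, ht⟩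
    exact hu ⟨t, [], by simpa using ht⟩

-- feeding [1,2,3,1] to a stack not ending in [1,2,3] counts one burger and restores the stack
theorem foldl_pattern (u : List Int) (a : Int) (v : List Int)
    (hu : ¬ ∃ t, u = t ++ [1, 2, 3]) :
    ([1, 2, 3, 1] ++ v).foldl solStep (u, a) = v.foldl solStep (u, a + 1) := by
  have h1 : solStep (u, a) 1 = (u ++ [1], a) := by
    apply solStep_not_ends
    rintro ⟨t, ht⟩
    exact hu ⟨t, by
      have : u ++ [1] = (t ++ [1, 2, 3]) ++ [1] := by simpa using ht
      exact List.append_cancel_right this⟩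
  have h2 : solStep (u ++ [1], a) 2 = (u ++ [1, 2], a) := by
    have hne : ¬ ∃ t, (u ++ [1]) ++ [(2 : Int)] = t ++ [1, 2, 3, 1] := by
      rintro ⟨t, ht⟩
      have : ((u ++ [1]) ++ [(2 : Int)]).getLast? = ((t ++ [1, 2, 3]) ++ [1]).getLast? := by
        rw [show (t ++ [1, 2, 3]) ++ [(1 : Int)] = t ++ [1, 2, 3, 1] by simp, ← ht]
      simp at this
    have := solStep_not_ends (u ++ [1], a) 2 hne
    simpa using this
  have h3 : solStep (u ++ [1, 2], a) 3 = (u ++ [1, 2, 3], a) := by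
    have hne : ¬ ∃ t, (u ++ [1, 2]) ++ [(3 : Int)] = t ++ [1, 2, 3, 1] := by
      rintro ⟨t, ht⟩
      have : ((u ++ [1, 2]) ++ [(3 : Int)]).getLast? = ((t ++ [1, 2, 3]) ++ [1]).getLast? := by
        rw [show (t ++ [1, 2, 3]) ++ [(1 : Int)] = t ++ [1, 2, 3, 1] by simp, ← ht]
      simp at this
    have := solStep_not_ends (u ++ [1, 2], a) 3 hne
    simpa using this
  have h4 : solStep (u ++ [1, 2, 3], a) 1 = (u, a + 1) := by
    rw [solStep_ends _ _ ⟨u, by simp⟩]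
    simp
  show List.foldl solStep (u, a) (1 :: 2 :: 3 :: 1 :: v) = _
  simp only [List.foldl_cons]
  rw [h1, h2, h3, h4]

-- the count component is affine in the accumulator
theorem solStep_affine (s : List Int) (a : Int) (i : Int) :
    solStep (s, a) i = ((solStep (s, 0) i).1, a + (solStep (s, 0) i).2) := by
  unfold solStep
  dsimp only
  split <;> simp

theorem foldl_snd_affine (v : List Int) (s : List Int) (a : Int) :
    v.foldl solStep (s, a) = ((v.foldl solStep (s, 0)).1, a + (v.foldl solStep (s, 0)).2) := by
  induction v generalizing s a with
  | nil => simp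
  | cons i t ih =>
    simp only [List.foldl_cons]
    rcases hp : solStep (s, 0) i with ⟨s1, b⟩
    rw [solStep_affine s a i, hp]
    dsimp only
    rw [ih s1 (a + b), ih s1 b]
    simp only [Prod.mk.injEq, true_and]
    ring

-- findBurger = none means no occurrence at all
theorem findBurger_none {l : List Int} (h : findBurger l = none) : NoOcc l := by
  induction l with
  | nil => rintro ⟨x, y, hx⟩; simp at hx
  | cons a t ih =>
    match t with
    | [] => rintro ⟨x, y, hx⟩; rcases x with _ | ⟨_, x⟩ <;> simp_all
    | [b] => rintro ⟨x, y, hx⟩; rcases x with _ | ⟨_, _ | ⟨_, x⟩⟩ <;> simp_all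
    | [b, c] =>
      rintro ⟨x, y, hx⟩
      rcases x with _ | ⟨_, _ | ⟨_, _ | ⟨_, x⟩⟩⟩ <;> simp_all
    | b :: c :: d :: t' =>
      rw [findBurger] at h
      split at h
      · simp at h
      · next hne =>
        cases hfb : findBurger (b :: c :: d :: t') with
        | some p => obtain ⟨u', v'⟩ := p; rw [hfb] at h; simp at h
        | none =>
          have ihn := ih hfb
          rintro ⟨x, y, hx⟩
          rcases x with _ | ⟨a', x'⟩
          · simp at hx
            obtain ⟨rfl, rfl, rfl, rfl, rfl⟩ := hx
            exact hne rfl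
          · simp at hx
            exact ihn ⟨x', y, by simp [hx.2]⟩

-- findBurger finds the FIRST occurrence: the prefix is occurrence-free and does not end in [1,2,3]
theorem findBurger_first {l u v : List Int} (h : findBurger l = some (u, v)) :
    NoOcc u ∧ ¬ ∃ t, u = t ++ [1, 2, 3] := by
  induction l generalizing u v with
  | nil => simp [findBurger] at h
  | cons a t ih =>
    match t, h with
    | b :: c :: d :: t', h =>
      rw [findBurger] at h
      split at h
      · obtain ⟨rfl, rfl⟩ := by simpa using h
        constructor
        · rintro ⟨x, y, hx⟩; simp at hx
        · rintro ⟨t, ht⟩; simp at ht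
      · next hne =>
        cases hfb : findBurger (b :: c :: d :: t') with
        | none => rw [hfb] at h; simp at h
        | some p =>
          obtain ⟨u', v'⟩ := p
          rw [hfb] at h
          obtain ⟨rfl, rfl⟩ := by simpa using h
          obtain ⟨hno, hne3⟩ := ih hfb
          have hsplit := findBurger_split hfb
          constructor
          · rintro ⟨x, y, hx⟩
            rcases x with _ | ⟨a', x'⟩
            · simp at hx
              obtain ⟨rfl, hu'⟩ := hx
              rw [hu'] at hsplit
              simp at hsplit
              exact hne (by simp [hsplit.1, hsplit.2.1, hsplit.2.2.1])
            · simp at hx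
              exact hno ⟨x', y, by simp [hx.2]⟩
          · rintro ⟨t0, ht0⟩
            rcases t0 with _ | ⟨a', t0'⟩
            · simp at ht0
              obtain ⟨rfl, hu'⟩ := ht0
              rw [hu'] at hsplit
              simp at hsplit
              exact hne (by simp [hsplit.1, hsplit.2.1, hsplit.2.2.1])
            · simp at ht0
              exact hne3 ⟨t0', by simp [ht0.2]⟩

theorem solution_eq_solGo (l : List Int) : (l.foldl solStep ([], 0)).2 = solGo l := by
  induction l using solGo.induct with
  | case1 l h => rw [foldl_noOcc l (findBurger_none h), solGo, h]
  | case2 l u v h ih =>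
    obtain ⟨hno, hne3⟩ := findBurger_first h
    have hsplit := findBurger_split h
    have hgo : solGo l = 1 + solGo (u ++ v) := by
      rw [solGo]
      split
      · next heq => rw [h] at heq; cases heq
      · next u' v' heq =>
        rw [h] at heq
        obtain ⟨rfl, rfl⟩ := by simpa using heq
        rfl
    have hv : (List.foldl solStep ([], 0) (u ++ v)).2 = (List.foldl solStep (u, 0) v).2 := by
      rw [List.foldl_append, foldl_noOcc u hno]
    rw [hgo, hsplit]
    simp only [List.append_assoc]
    rw [List.foldl_append, foldl_noOcc u hno, foldl_pattern u 0 v hne3,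
      foldl_snd_affine v u (0 + 1), ← ih, hv]
    ring

-- ===== VERDICT (by name: the statement is the Claim_ definition above) =====
theorem solution_spec : Claim_equal_solution := by
  intro ingredient _
  unfold Spec_solution solution solution_alt
  exact solution_eq_solGo ingredient
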